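-- pv_equiv track=rewrite | github.com/UlugbekMuslitdinov/csc110 | diction.py | indices_of_words
-- ===== SOURCE A (Python) =====
-- def indices_of_words(strings):
--     """
--     This function returns a dictionary with the indices of each word in each string.
--     It loops through each string and writes the index of the string in which this word is found.
--
--     Parameters:
--         strings (list): A list of strings.
--
--     Returns:
--         count (dict): A dictionary with the indices of each word in each string.
--     """
--     count = {}
--     for i in range(len(strings)):
--         words = strings[i].split()
--         for word in words:
--             if word in count:
--                 if i not in count[word]:
--                     count[word].append(i)
--             else:
--                 count[word] = [i]
--     return count
-- ===== SOURCE B (Python) =====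
-- def indices_of_words(strings):
--     """Alternative (staged, inverted): precompute each line's word set, build the
--     vocabulary in first-occurrence order, then for each word scan the lines once
--     to collect its column of indices."""
--     word_sets = [set(s.split()) for s in strings]
--     vocab = dict.fromkeys(w for s in strings for w in s.split())
--     return {w: [i for i, ws in enumerate(word_sets) if w in ws] for w in vocab}
-- ===== Notes on version B (the rewrite author's own statement) =====
-- stated objective: alternative
-- what changed: B inverts the construction: instead of A's per-line accumulation into a growing dict with an 'i not in count[word]' list scan, it precomputes each line's word set, builds the vocabulary in first-occurrence order, and then for each vocabulary word performs one column scan over the precomputed line sets collecting the indices that contain it.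
import Mathlib
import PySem

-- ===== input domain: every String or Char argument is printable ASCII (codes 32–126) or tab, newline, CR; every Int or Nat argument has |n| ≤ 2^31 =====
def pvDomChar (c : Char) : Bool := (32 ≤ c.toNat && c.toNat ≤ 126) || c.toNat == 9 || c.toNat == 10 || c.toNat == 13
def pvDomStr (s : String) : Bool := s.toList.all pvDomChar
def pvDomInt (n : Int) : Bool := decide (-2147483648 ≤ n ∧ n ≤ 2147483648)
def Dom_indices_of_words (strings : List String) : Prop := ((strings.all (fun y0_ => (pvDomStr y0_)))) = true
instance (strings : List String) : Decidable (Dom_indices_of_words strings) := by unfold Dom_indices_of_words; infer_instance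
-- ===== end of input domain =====

-- B inverts the construction: vocabulary first, then one column scan of the per-line word sets
-- per word, instead of A's per-line accumulation with an 'i not in count[word]' scan (alternative).


-- ===== PORT A =====
def indices_of_words (strings : List String) : List (String × List Int) :=
  ((PySem.List.pyRange 0 (PySem.List.len strings) 1).foldl (fun count i =>
      (PySem.Str.split₀ (PySem.List.pyGetD strings i "")).foldl (fun count word =>
        if count.contains word then
          (if i ∈ count.getD word [] then count else count.modify word [] (· ++ [i]))
        else count.insert word [i]) count)
    (PySem.Dict.empty : PySem.Dict String (List Int))).items

-- ===== PORT B =====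
def indices_of_words_alt (strings : List String) : List (String × List Int) :=
  let wordSets : List (PySem.Set String) :=
    strings.map (fun s => PySem.Set.ofList (PySem.Str.split₀ s))
  let vocab : List String :=
    PySem.List.dedup (strings.flatMap (fun s => PySem.Str.split₀ s))
  (PySem.Dict.ofList (vocab.map (fun w =>
    (w, ((PySem.List.enumerate wordSets).filter (fun p => decide (w ∈ p.2))).map
          (fun p => p.1))))).items

-- ===== PRECONDITION & SPEC =====
def Spec_indices_of_words (strings : List String) (out : List (String × List Int)) : Prop := out = indices_of_words_alt strings
instance (strings : List String) (out : List (String × List Int)) : Decidable (Spec_indices_of_words strings out) := by unfold Spec_indices_of_words; infer_instance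

-- ===== CLAIM (what is proved, stated in full; the proofs are below) =====
def Claim_equal_indices_of_words : Prop := ∀ (strings : List String), Dom_indices_of_words strings → Spec_indices_of_words strings (indices_of_words strings)

-- ===== LEMMAS AND PROOFS =====

-- A's inner-loop body
def pvStepA (i : Int) (d : PySem.Dict String (List Int)) (w : String) : PySem.Dict String (List Int) :=
  if d.contains w then
    (if i ∈ d.getD w [] then d else d.modify w [] (· ++ [i]))
  else d.insert w [i]

-- the unconditional append step A's body reduces to when i is fresh
def pvStepM (i : Int) (d : PySem.Dict String (List Int)) (w : String) : PySem.Dict String (List Int) :=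
  d.modify w [] (· ++ [i])

-- dedup of ws with the words of S removed (S = words already seen this line)
def pvDedup (S : List String) : List String → List String
  | [] => []
  | w :: ws => if w ∈ S then pvDedup S ws else w :: pvDedup (w :: S) ws

lemma pvDedup_congr (ws : List String) : ∀ (S S' : List String), (∀ x, x ∈ S ↔ x ∈ S') →
    pvDedup S ws = pvDedup S' ws := by
  induction ws with
  | nil => intro S S' _; rfl
  | cons w ws ih =>
    intro S S' h
    simp only [pvDedup]
    by_cases hw : w ∈ S
    · rw [if_pos hw, if_pos ((h w).mp hw)]; exact ih S S' h
    · rw [if_neg hw, if_neg (fun hx => hw ((h w).mpr hx))]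
      exact congrArg (w :: ·) (ih (w :: S) (w :: S') (by intro x; simp [h x]))

lemma pvDedup_eq_foldl_add (ws : List String) : ∀ (s : List String),
    ws.foldl PySem.Set.add s = s ++ pvDedup s ws := by
  induction ws with
  | nil => intro s; simp [pvDedup]
  | cons w ws ih =>
    intro s
    simp only [List.foldl_cons, pvDedup]
    by_cases hw : w ∈ s
    · rw [if_pos hw, PySem.Set.add_of_mem hw]; exact ih s
    · rw [if_neg hw, PySem.Set.add_of_not_mem hw, ih (s ++ [w])]
      rw [pvDedup_congr ws (s ++ [w]) (w :: s) (by intro x; simp [or_comm])]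
      simp

lemma pvDedup_nil_eq_dedup (ws : List String) : pvDedup [] ws = PySem.List.dedup ws := by
  have : PySem.List.dedup ws = ws.foldl PySem.Set.add [] := by
    simp [PySem.List.dedup_eq_ofList, PySem.Set.ofList_eq_foldl]
  rw [this, pvDedup_eq_foldl_add ws []]; rfl

lemma pvDedup_pvDedup (ws : List String) : ∀ (S T : List String), (∀ x ∈ T, x ∈ S) →
    pvDedup S (pvDedup T ws) = pvDedup S ws := by
  induction ws with
  | nil => intro S T _; rfl
  | cons w ws ih =>
    intro S T h
    simp only [pvDedup]
    by_cases hT : w ∈ T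
    · rw [if_pos hT, if_pos (h w hT)]; exact ih S T h
    · rw [if_neg hT]
      simp only [pvDedup]
      by_cases hS : w ∈ S
      · rw [if_pos hS, if_pos hS]
        exact ih S (w :: T) (by
          intro x hx
          rcases List.mem_cons.mp hx with hx | hx
          · exact hx ▸ hS
          · exact h x hx)
      · rw [if_neg hS, if_neg hS]
        exact congrArg (w :: ·) (ih (w :: S) (w :: T)
          (by
            intro x hx
            rcases List.mem_cons.mp hx with hx | hx
            · exact List.mem_cons.mpr (Or.inl hx)
            · exact List.mem_cons.mpr (Or.inr (h x hx))))

-- modify d k dflt f = insert k (f (getD k dflt))  (definitional)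
lemma pvModify_eq (d : PySem.Dict String (List Int)) (k : String) (f : List Int → List Int) :
    d.modify k [] f = d.insert k (f (d.getD k [])) := rfl

lemma pvStepA_eq_stepM (i : Int) (d : PySem.Dict String (List Int)) (w : String)
    (h : i ∉ d.getD w []) : pvStepA i d w = pvStepM i d w := by
  unfold pvStepA pvStepM
  by_cases hc : d.contains w
  · rw [if_pos hc, if_neg h]
  · rw [if_neg hc, pvModify_eq, PySem.Dict.getD_of_not_contains d [] (by simpa using hc)]
    rfl

lemma pvGetD_stepM (i : Int) (d : PySem.Dict String (List Int)) (w v : String) :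
    (pvStepM i d w).getD v [] = if v = w then d.getD w [] ++ [i] else d.getD v [] := by
  unfold pvStepM
  rw [PySem.Dict.getD_modify]

-- one line: A's fold over all words equals the plain append-fold over the not-yet-seen dedup
lemma pvLine (i : Int) (ws : List String) : ∀ (S : List String) (d : PySem.Dict String (List Int)),
    (∀ w, i ∈ d.getD w [] ↔ w ∈ S) →
    ws.foldl (pvStepA i) d = (pvDedup S ws).foldl (pvStepM i) d := by
  induction ws with
  | nil => intro S d _; rfl
  | cons w ws ih =>
    intro S d hinv
    simp only [List.foldl_cons, pvDedup]
    by_cases hw : w ∈ S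
    · rw [if_pos hw]
      have hskip : pvStepA i d w = d := by
        have hi : i ∈ d.getD w [] := (hinv w).mpr hw
        have hc : d.contains w := by
          by_contra hc
          rw [PySem.Dict.getD_of_not_contains d [] (by simpa using hc)] at hi
          simp at hi
        unfold pvStepA; rw [if_pos hc, if_pos hi]
      rw [hskip]; exact ih S d hinv
    · rw [if_neg hw, pvStepA_eq_stepM i d w (fun hi => hw ((hinv w).mp hi))]
      simp only [List.foldl_cons]
      refine ih (w :: S) (pvStepM i d w) ?_
      intro v
      rw [pvGetD_stepM]
      by_cases hv : v = w
      · subst hv; simp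
      · rw [if_neg hv]; simp [hinv v, hv]

lemma pvBound (i : Int) (ws : List String) : ∀ (d : PySem.Dict String (List Int)) (v : String) (j : Int),
    j ∈ (ws.foldl (pvStepM i) d).getD v [] → j ∈ d.getD v [] ∨ j = i := by
  induction ws with
  | nil => intro d v j h; exact Or.inl h
  | cons w ws ih =>
    intro d v j h
    rcases ih (pvStepM i d w) v j h with h' | h'
    · rw [pvGetD_stepM] at h'
      by_cases hv : v = w
      · subst hv; rw [if_pos rfl] at h'
        rcases List.mem_append.mp h' with h'' | h''
        · exact Or.inl h''
        · simp at h''; exact Or.inr h''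
      · rw [if_neg hv] at h'; exact Or.inl h'
    · exact Or.inr h'

-- all the lines: A's fold agrees with the per-line-dedup append-fold from any dict whose stored indices are < s
lemma pvLines (xs : List String) : ∀ (s : Int) (d : PySem.Dict String (List Int)),
    (∀ v j, j ∈ d.getD v [] → j < s) →
    (PySem.List.enumerate xs s).foldl (fun d p => (PySem.Str.split₀ p.2).foldl (pvStepA p.1) d) d
      = (PySem.List.enumerate xs s).foldl (fun d p => (PySem.List.dedup (PySem.Str.split₀ p.2)).foldl (pvStepM p.1) d) d := by
  induction xs with
  | nil => intro s d _; rfl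
  | cons x xs ih =>
    intro s d hb
    rw [PySem.List.enumerate_cons]
    simp only [List.foldl_cons]
    have h1 : (PySem.Str.split₀ x).foldl (pvStepA s) d
        = (PySem.List.dedup (PySem.Str.split₀ x)).foldl (pvStepM s) d := by
      rw [← pvDedup_nil_eq_dedup]
      exact pvLine s (PySem.Str.split₀ x) [] d
        (by intro w; simp; intro hi; exact absurd (hb w s hi) (lt_irrefl s))
    rw [h1]
    exact ih (s + 1) _ (by
      intro v j hj
      rcases pvBound s (PySem.List.dedup (PySem.Str.split₀ x)) d v j hj with h' | h'
      · exact lt_trans (hb v j h') (by omega)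
      · omega)

-- the flat occurrence list driving the append-fold
def pvPairs (strings : List String) : List (String × Int) :=
  (PySem.List.enumerate strings).flatMap
    (fun p => (PySem.List.dedup (PySem.Str.split₀ p.2)).map (fun w => (w, p.1)))

-- E = the dict the append-fold builds
def pvE (strings : List String) : PySem.Dict String (List Int) :=
  (pvPairs strings).foldl (fun d q => d.modify q.1 [] (· ++ [q.2])) PySem.Dict.empty

lemma pvE_eq_lines (strings : List String) :
    (PySem.List.enumerate strings).foldl
      (fun d p => (PySem.List.dedup (PySem.Str.split₀ p.2)).foldl (pvStepM p.1) d) PySem.Dict.empty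
    = pvE strings := by
  unfold pvE pvPairs
  rw [List.foldl_flatMap]
  have : (fun d (p : Int × String) =>
        ((PySem.List.dedup (PySem.Str.split₀ p.2)).map (fun w => (w, p.1))).foldl
          (fun d q => d.modify q.1 [] (· ++ [q.2])) d)
      = fun d (p : Int × String) => (PySem.List.dedup (PySem.Str.split₀ p.2)).foldl (pvStepM p.1) d := by
    funext d p
    rw [List.foldl_map]
    rfl
  rw [this]

lemma pvFlatMap_enum {β : Type} (g : String → List β) (xs : List String) : ∀ (s : Int),
    (PySem.List.enumerate xs s).flatMap (fun p => g p.2) = xs.flatMap g := by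
  induction xs with
  | nil => intro s; rfl
  | cons x xs ih =>
    intro s
    rw [PySem.List.enumerate_cons, List.flatMap_cons, List.flatMap_cons, ih (s + 1)]

lemma pvOfList_flat_dedup (xs : List String) : ∀ (S : List String),
    (xs.flatMap (fun s => PySem.List.dedup (PySem.Str.split₀ s))).foldl PySem.Set.add S
      = (xs.flatMap (fun s => PySem.Str.split₀ s)).foldl PySem.Set.add S := by
  induction xs with
  | nil => intro S; rfl
  | cons x xs ih =>
    intro S
    rw [List.flatMap_cons, List.flatMap_cons, List.foldl_append, List.foldl_append, ih]
    congr 1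
    rw [pvDedup_eq_foldl_add, pvDedup_eq_foldl_add, ← pvDedup_nil_eq_dedup,
      pvDedup_pvDedup _ S [] (by intro x hx; simp at hx)]

lemma pvFilter_nodup_eq (l : List String) (w : String) (h : l.Nodup) :
    l.filter (fun v => v == w) = if w ∈ l then [w] else [] := by
  induction l with
  | nil => simp
  | cons a l ih =>
    rw [List.nodup_cons] at h
    by_cases ha : a = w
    · subst ha
      have h0 : l.filter (fun v => v == a) = [] := by rw [ih h.2, if_neg h.1]
      rw [List.filter_cons_of_pos (by simp), h0, if_pos (List.mem_cons_self ..)]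
    · rw [List.filter_cons_of_neg (by simp [ha]), ih h.2]
      by_cases hw : w ∈ l
      · rw [if_pos hw, if_pos (List.mem_cons_of_mem a hw)]
      · rw [if_neg hw, if_neg (by simp [hw, Ne.symm ha])]

lemma pvEnum_map {α β : Type} (f : α → β) (xs : List α) : ∀ (s : Int),
    PySem.List.enumerate (xs.map f) s = (PySem.List.enumerate xs s).map (fun p => (p.1, f p.2)) := by
  induction xs with
  | nil => intro s; rfl
  | cons x xs ih =>
    intro s
    rw [List.map_cons, PySem.List.enumerate_cons, PySem.List.enumerate_cons, List.map_cons, ih (s + 1)]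

lemma pvFilterMap_eq_flatMap {α β : Type} (l : List α) (q : α → Bool) (f : α → β) :
    (l.filter q).map f = l.flatMap (fun x => if q x then [f x] else []) := by
  induction l with
  | nil => rfl
  | cons a l ih =>
    rw [List.filter_cons, List.flatMap_cons, ← ih]
    by_cases hq : q a
    · simp [hq]
    · simp [hq]

-- E's value at any word w is the column of line indices whose word list contains w
lemma pvE_getD (strings : List String) (w : String) :
    (pvE strings).getD w []
      = (PySem.List.enumerate strings).flatMap
          (fun p => if w ∈ PySem.Str.split₀ p.2 then [p.1] else []) := by
  unfold pvE
  rw [PySem.Dict.getD_foldl_modify_append, PySem.Dict.getD_empty, List.nil_append]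
  unfold pvPairs
  rw [List.filter_flatMap, List.map_flatMap]
  congr 1
  funext p
  rw [List.filter_map, List.map_map]
  have : ((PySem.List.dedup (PySem.Str.split₀ p.2)).filter ((fun q => q.1 == w) ∘ fun v => (v, p.1)))
      = (PySem.List.dedup (PySem.Str.split₀ p.2)).filter (fun v => v == w) := rfl
  rw [this, pvFilter_nodup_eq _ w (by rw [PySem.List.dedup_eq_ofList]; exact PySem.Set.nodup_ofList _)]
  by_cases hw : w ∈ PySem.Str.split₀ p.2
  · rw [if_pos (by rw [PySem.List.dedup_eq_ofList, PySem.Set.mem_ofList]; exact hw), if_pos hw]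
    rfl
  · rw [if_neg (by rw [PySem.List.dedup_eq_ofList, PySem.Set.mem_ofList]; exact hw), if_neg hw]
    rfl

lemma pvE_keys (strings : List String) :
    (pvE strings).keys = PySem.List.dedup (strings.flatMap (fun s => PySem.Str.split₀ s)) := by
  unfold pvE
  rw [PySem.Dict.keys_foldl_modify_key (pvPairs strings) (fun q => q.1) []
    (fun _ q v => v ++ [q.2]) PySem.Dict.empty]
  rw [PySem.Dict.keys_empty]
  show PySem.Set.update [] ((pvPairs strings).map (fun q => q.1))
    = PySem.List.dedup (strings.flatMap (fun s => PySem.Str.split₀ s))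
  unfold PySem.Set.update pvPairs
  rw [List.map_flatMap]
  have : (fun p : Int × String => ((PySem.List.dedup (PySem.Str.split₀ p.2)).map (fun w => (w, p.1))).map (fun q => q.1))
      = fun p : Int × String => PySem.List.dedup (PySem.Str.split₀ p.2) := by
    funext p
    rw [List.map_map]
    exact List.map_id'' (fun w => rfl) _
  rw [this, pvFlatMap_enum (fun s => PySem.List.dedup (PySem.Str.split₀ s)) strings 0,
    pvOfList_flat_dedup, PySem.List.dedup_eq_ofList, PySem.Set.ofList_eq_foldl]

lemma pvE_nodup (strings : List String) : (pvE strings).keys.Nodup := by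
  rw [pvE_keys, PySem.List.dedup_eq_ofList]
  exact PySem.Set.nodup_ofList _

-- B's items are literally the vocabulary map (fresh nodup keys appended into an empty dict)
lemma pvB_items (strings : List String) :
    indices_of_words_alt strings
      = (PySem.List.dedup (strings.flatMap (fun s => PySem.Str.split₀ s))).map (fun w =>
          (w, ((PySem.List.enumerate strings).filter
                (fun p => decide (w ∈ PySem.Str.split₀ p.2))).map (fun p => p.1))) := by
  unfold indices_of_words_alt
  simp only [PySem.Dict.ofList, PySem.Dict.update]
  rw [List.foldl_map]
  rw [PySem.Dict.items_foldl_insert_fresh _ (fun w => w)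
      (fun w => ((PySem.List.enumerate (strings.map (fun s => PySem.Set.ofList (PySem.Str.split₀ s)))).filter
        (fun p => decide (w ∈ p.2))).map (fun p => p.1)) PySem.Dict.empty
      (by intro a _; exact PySem.Dict.contains_empty a)
      (by simp only [List.map_id']; rw [PySem.List.dedup_eq_ofList]; exact PySem.Set.nodup_ofList _)]
  have hempty : (PySem.Dict.empty : PySem.Dict String (List Int)).items = [] := rfl
  rw [hempty, List.nil_append]
  refine List.map_congr_left ?_
  intro w _
  rw [pvEnum_map, List.filter_map]
  have : ((PySem.List.enumerate strings).filter ((fun p => decide (w ∈ p.2)) ∘ fun p : Int × String => (p.1, PySem.Set.ofList (PySem.Str.split₀ p.2))))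
      = (PySem.List.enumerate strings).filter (fun p => decide (w ∈ PySem.Str.split₀ p.2)) := by
    refine List.filter_congr ?_
    intro p _
    simp [PySem.Set.mem_ofList]
  rw [this, List.map_map]
  rfl

-- ===== VERDICT (by name: the statement is the Claim_ definition above) =====
theorem indices_of_words_spec : Claim_equal_indices_of_words := by
  intro strings _
  show indices_of_words strings = indices_of_words_alt strings
  unfold indices_of_words
  have hA : (PySem.List.pyRange 0 (PySem.List.len strings) 1).foldl
        (fun d i => (PySem.Str.split₀ (PySem.List.pyGetD strings i "")).foldl (pvStepA i) d)
        PySem.Dict.empty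
      = (PySem.List.enumerate strings).foldl
        (fun d p => (PySem.Str.split₀ p.2).foldl (pvStepA p.1) d) PySem.Dict.empty := by
    rw [PySem.List.enumerate_eq_map_pyRange strings "", List.foldl_map]
  have hE : (PySem.List.enumerate strings).foldl
        (fun d p => (PySem.Str.split₀ p.2).foldl (pvStepA p.1) d) PySem.Dict.empty = pvE strings := by
    rw [pvLines strings 0 PySem.Dict.empty
      (by intro v j hj; rw [PySem.Dict.getD_empty] at hj; simp at hj)]
    exact pvE_eq_lines strings
  show ((PySem.List.pyRange 0 (PySem.List.len strings) 1).foldl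
        (fun d i => (PySem.Str.split₀ (PySem.List.pyGetD strings i "")).foldl (pvStepA i) d)
        PySem.Dict.empty).items = _
  rw [hA, hE, pvB_items strings,
    PySem.Dict.items_eq_map_keys (pvE strings) (pvE_nodup strings) [], pvE_keys strings]
  refine List.map_congr_left ?_
  intro w _
  rw [pvE_getD strings w, pvFilterMap_eq_flatMap]
  have : (fun p : Int × String => if w ∈ PySem.Str.split₀ p.2 then [p.1] else [])
      = fun p : Int × String => if decide (w ∈ PySem.Str.split₀ p.2) = true then [p.1] else [] := by
    funext p
    by_cases hw : w ∈ PySem.Str.split₀ p.2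
    · simp [hw]
    · simp [hw]
  rw [this]
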